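-- pv_equiv track=rewrite | github.com/LMajnaric/tsp-ga | crossovers.py | create_neighbor_list
-- ===== SOURCE A (Python) =====
-- def create_neighbor_list(parent1, parent2):
--     size = len(parent1)
--     neighbors = {key: set() for key in range(size)}
--
--     for p in [parent1, parent2]:
--         for i in range(size):
--             left = p[i - 1]
--             right = p[(i + 1) % size]
--             neighbors[p[i]].update([left, right])
--
--     return neighbors
-- ===== SOURCE B (Python) =====
-- def create_neighbor_list(parent1, parent2):
--     size = len(parent1)
--     occ = {key: [] for key in range(size)}
--     for p in (parent1, parent2):
--         for i in range(size):
--             occ[p[i]].append((p, i))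
--     return {k: {p[j] for p, i in pos for j in (i - 1, (i + 1) % size)}
--             for k, pos in occ.items()}
-- ===== Notes on version B (the rewrite author's own statement) =====
-- stated objective: alternative
-- what changed: Instead of A's single scan that mutates each vertex's neighbor set in place, B first builds a position index (vertex -> list of (tour, position) occurrences, keyed by the same range dict) and then constructs every neighbor set per key from that index in a dict comprehension.
import Mathlib
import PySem

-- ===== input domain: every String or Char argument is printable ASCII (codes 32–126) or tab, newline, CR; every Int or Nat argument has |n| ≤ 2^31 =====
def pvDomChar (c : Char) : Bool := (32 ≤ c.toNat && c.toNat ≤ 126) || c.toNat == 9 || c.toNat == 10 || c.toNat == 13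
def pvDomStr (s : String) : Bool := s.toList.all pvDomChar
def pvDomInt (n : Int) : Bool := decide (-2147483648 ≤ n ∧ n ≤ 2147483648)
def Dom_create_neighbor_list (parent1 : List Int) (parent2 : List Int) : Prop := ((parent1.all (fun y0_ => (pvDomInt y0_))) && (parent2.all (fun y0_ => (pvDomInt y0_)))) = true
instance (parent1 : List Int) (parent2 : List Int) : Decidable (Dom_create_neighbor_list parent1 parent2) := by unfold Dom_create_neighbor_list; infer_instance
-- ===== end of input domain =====

-- B replaces A's in-place scatter (mutating each vertex's neighbor set while scanning) by a
-- two-phase group-by: index the occurrence positions per vertex, then build each neighbor set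
-- per key; objective: alternative decomposition of the same cost, not faster.

-- ===== PORT A =====
def create_neighbor_list (parent1 : List Int) (parent2 : List Int) : List (Int × List Int) :=
  let size : Int := (parent1.length : Int)
  let neighbors : PySem.Dict Int (PySem.Set Int) :=
    (PySem.List.pyRange 0 size 1).foldl (fun d key => d.insert key PySem.Set.empty) PySem.Dict.empty
  let final : PySem.Dict Int (PySem.Set Int) :=
    ([parent1, parent2]).foldl (fun d p =>
      (PySem.List.pyRange 0 size 1).foldl (fun d i =>
        let left := PySem.List.pyGetD p (i - 1) 0
        let right := PySem.List.pyGetD p (PySem.Int.mod (i + 1) size) 0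
        d.modify (PySem.List.pyGetD p i 0) [] (fun s => PySem.Set.update s [left, right])) d) neighbors
  final.items

-- ===== PORT B =====
def create_neighbor_list_alt (parent1 : List Int) (parent2 : List Int) : List (Int × List Int) :=
  let size : Int := (parent1.length : Int)
  let occ : PySem.Dict Int (List (List Int × Int)) :=
    (PySem.List.pyRange 0 size 1).foldl (fun d key => d.insert key []) PySem.Dict.empty
  let occ2 : PySem.Dict Int (List (List Int × Int)) :=
    ([parent1, parent2]).foldl (fun d p =>
      (PySem.List.pyRange 0 size 1).foldl (fun d i =>
        d.modify (PySem.List.pyGetD p i 0) [] (fun l => l ++ [(p, i)])) d) occ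
  occ2.items.map (fun kp =>
    (kp.1, PySem.Set.ofList (kp.2.flatMap (fun pi =>
      [PySem.List.pyGetD pi.1 (pi.2 - 1) 0,
       PySem.List.pyGetD pi.1 (PySem.Int.mod (pi.2 + 1) size) 0]))))

-- ===== PRECONDITION & SPEC =====
-- Exactly where Python A returns: parent2 at least as long as parent1 (else IndexError), and
-- every value of parent1 and of the first len(parent1) values of parent2 lies in range(len(parent1))
-- (else KeyError on neighbors[p[i]]).  Python B raises on exactly the same inputs.
def Pre_create_neighbor_list (parent1 : List Int) (parent2 : List Int) : Prop :=
  parent1.length ≤ parent2.length ∧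
  (∀ x ∈ parent1, 0 ≤ x ∧ x < (parent1.length : Int)) ∧
  (∀ x ∈ parent2.take parent1.length, 0 ≤ x ∧ x < (parent1.length : Int))
instance (parent1 : List Int) (parent2 : List Int) : Decidable (Pre_create_neighbor_list parent1 parent2) := by unfold Pre_create_neighbor_list; infer_instance
def pvWitness_create_neighbor_list : List Int × List Int := ([0, 1, 2], [1, 0, 2])

def Spec_create_neighbor_list (parent1 : List Int) (parent2 : List Int) (out : List (Int × List Int)) : Prop := out = create_neighbor_list_alt parent1 parent2
instance (parent1 : List Int) (parent2 : List Int) (out : List (Int × List Int)) : Decidable (Spec_create_neighbor_list parent1 parent2 out) := by unfold Spec_create_neighbor_list; infer_instance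

-- ===== CLAIM (what is proved, stated in full; the proofs are below) =====
def Claim_equal_create_neighbor_list : Prop := ∀ (parent1 : List Int) (parent2 : List Int), Dom_create_neighbor_list parent1 parent2 → Pre_create_neighbor_list parent1 parent2 → Spec_create_neighbor_list parent1 parent2 (create_neighbor_list parent1 parent2)

-- ===== LEMMAS AND PROOFS =====

-- s.update(xs) adds nothing when every element of xs is already in s
lemma pvUpdate_eq_self_of_mem (s : PySem.Set Int) (xs : List Int) (h : ∀ x ∈ xs, x ∈ s) :
    PySem.Set.update s xs = s := by
  rw [PySem.Set.update_eq_append_filter]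
  have : (PySem.Set.ofList xs).filter (fun y => !(PySem.Set.contains s y)) = [] := by
    rw [List.filter_eq_nil_iff]
    intro y hy
    have : y ∈ s := h y ((PySem.Set.mem_ofList xs y).1 hy)
    simp [PySem.Set.contains_eq_listContains, this]
  rw [this, List.append_nil]

-- value at k after A's inner modify-fold over an index list
lemma pvGetD_foldl_modify (v l r : Int → Int) (is : List Int)
    (d : PySem.Dict Int (PySem.Set Int)) (k : Int) :
    (is.foldl (fun d i => d.modify (v i) [] (fun s => PySem.Set.update s [l i, r i])) d).getD k []
      = PySem.Set.update (d.getD k [])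
          (is.flatMap (fun i => if v i == k then [l i, r i] else [])) := by
  induction is generalizing d with
  | nil => simp [PySem.Set.update_nil]
  | cons i is ih =>
    simp only [List.foldl_cons, List.flatMap_cons, ih, PySem.Dict.getD_modify]
    by_cases hk : k = v i
    · subst hk
      simp
    · have hne : (v i == k) = false := by
        simp only [beq_eq_false_iff_ne, ne_eq]
        exact fun h => hk h.symm
      simp [hk, hne]

-- value at k after B's inner append-modify fold over an index list
lemma pvGetD_foldl_modify_append {β : Type} (v : Int → Int) (c : Int → β) (is : List Int)
    (d : PySem.Dict Int (List β)) (k : Int) :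
    (is.foldl (fun d i => d.modify (v i) [] (fun l => l ++ [c i])) d).getD k []
      = d.getD k [] ++ is.flatMap (fun i => if v i == k then [c i] else []) := by
  induction is generalizing d with
  | nil => simp
  | cons i is ih =>
    simp only [List.foldl_cons, List.flatMap_cons, ih, PySem.Dict.getD_modify]
    by_cases hk : k = v i
    · subst hk
      simp
    · have hne : (v i == k) = false := by
        simp only [beq_eq_false_iff_ne, ne_eq]
        exact fun h => hk h.symm
      simp [hk, hne]

-- the initial dict {k: c for k in ks} (ks without duplicates)
lemma pvInit_items {ν : Type} (ks : List Int) (hnd : ks.Nodup) (c : ν) :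
    ((ks.foldl (fun d k => d.insert k c) (PySem.Dict.empty : PySem.Dict Int ν))).items
      = ks.map (fun k => (k, c)) := by
  rw [PySem.Dict.items_foldl_insert_fresh ks (fun k => k) (fun _ => c) PySem.Dict.empty
    (by intro a _; simp [PySem.Dict.contains_empty]) (by simpa [List.map_id] using hnd)]
  rfl

lemma pvInit_keys {ν : Type} (ks : List Int) (hnd : ks.Nodup) (c : ν) :
    ((ks.foldl (fun d k => d.insert k c) (PySem.Dict.empty : PySem.Dict Int ν))).keys = ks := by
  simp only [PySem.Dict.keys]
  rw [pvInit_items ks hnd c, List.map_map]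
  simp [Function.comp_def]

lemma pvInit_getD {ν : Type} (ks : List Int) (hnd : ks.Nodup) (c : ν) (k : Int) (hk : k ∈ ks)
    (d0 : ν) :
    ((ks.foldl (fun d k => d.insert k c) (PySem.Dict.empty : PySem.Dict Int ν))).getD k d0 = c :=
  PySem.Dict.getD_of_mem_items _ (by rw [pvInit_items ks hnd c]; exact List.mem_map_of_mem hk)
    (by rw [pvInit_keys ks hnd c]; exact hnd) d0

-- flattening the singleton-filtered stream and then expanding each element is the
-- direct filtered expansion
lemma pvFlatMap_if {β γ : Type} (q : Int → Bool) (g : Int → β) (h : β → List γ) (is : List Int) :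
    (is.flatMap (fun i => if q i then [g i] else [])).flatMap h
      = is.flatMap (fun i => if q i then h (g i) else []) := by
  induction is with
  | nil => rfl
  | cons i is ih =>
    by_cases hq : q i = true
    · simp [List.flatMap_cons, hq, ih]
    · simp only [Bool.not_eq_true] at hq
      simp [List.flatMap_cons, hq, ih]

lemma pvMemRange (p : List Int) (n : Int) (hn : n ≤ (p.length : Int))
    (h : ∀ x ∈ p.take n.toNat, 0 ≤ x ∧ x < n) :
    ∀ i ∈ PySem.List.pyRange 0 n 1, PySem.List.pyGetD p i 0 ∈ PySem.List.pyRange 0 n 1 := by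
  intro i hi
  obtain ⟨hi0, hi1⟩ := PySem.List.mem_pyRange_one.1 hi
  have hlt : i < (p.length : Int) := lt_of_lt_of_le hi1 hn
  rw [PySem.List.pyGetD_eq_getElem p 0 hi0 hlt]
  have htk : i.toNat < (p.take n.toNat).length := by
    simp [List.length_take]
    omega
  have : p[i.toNat] ∈ p.take n.toNat := by
    have := List.getElem_mem htk
    rwa [List.getElem_take] at this
  exact PySem.List.mem_pyRange_one.2 (h _ this)

lemma pvMain (p1 p2 : List Int) (hlen : p1.length ≤ p2.length)
    (h1 : ∀ x ∈ p1, 0 ≤ x ∧ x < (p1.length : Int))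
    (h2 : ∀ x ∈ p2.take p1.length, 0 ≤ x ∧ x < (p1.length : Int)) :
    create_neighbor_list p1 p2 = create_neighbor_list_alt p1 p2 := by
  simp only [create_neighbor_list, create_neighbor_list_alt, List.foldl_cons, List.foldl_nil]
  set n : Int := (p1.length : Int) with hn
  set rng := PySem.List.pyRange 0 n 1 with hrng
  have nod : rng.Nodup := PySem.List.nodup_pyRange_one 0 n
  -- the two membership facts
  have hmem1 : ∀ i ∈ rng, PySem.List.pyGetD p1 i 0 ∈ rng := by
    apply pvMemRange p1 n le_rfl
    intro x hx
    exact h1 x (List.mem_of_mem_take hx)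
  have hmem2 : ∀ i ∈ rng, PySem.List.pyGetD p2 i 0 ∈ rng := by
    apply pvMemRange p2 n (by rw [hn]; exact_mod_cast hlen)
    intro x hx
    apply h2 x
    simpa [hn, Int.toNat_natCast] using hx
  have hsub1 : ∀ x ∈ rng.map (fun i => PySem.List.pyGetD p1 i 0), x ∈ rng := by
    intro x hx
    obtain ⟨i, hi, rfl⟩ := List.mem_map.1 hx
    exact hmem1 i hi
  have hsub2 : ∀ x ∈ rng.map (fun i => PySem.List.pyGetD p2 i 0), x ∈ rng := by
    intro x hx
    obtain ⟨i, hi, rfl⟩ := List.mem_map.1 hx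
    exact hmem2 i hi
  -- A's final dict: keys stay rng …
  have hkeysA : (List.foldl
      (fun d i => d.modify (PySem.List.pyGetD p2 i 0) [] fun s =>
        s.update [PySem.List.pyGetD p2 (i - 1) 0, PySem.List.pyGetD p2 (PySem.Int.mod (i + 1) n) 0])
      (List.foldl
        (fun d i => d.modify (PySem.List.pyGetD p1 i 0) [] fun s =>
          s.update [PySem.List.pyGetD p1 (i - 1) 0, PySem.List.pyGetD p1 (PySem.Int.mod (i + 1) n) 0])
        (rng.foldl (fun d key => d.insert key PySem.Set.empty) (PySem.Dict.empty : PySem.Dict Int (PySem.Set Int))) rng) rng).keys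
      = rng := by
    rw [PySem.Dict.keys_foldl_modify_key rng (fun i => PySem.List.pyGetD p2 i 0) []
      (fun _ i s => PySem.Set.update s
        [PySem.List.pyGetD p2 (i - 1) 0, PySem.List.pyGetD p2 (PySem.Int.mod (i + 1) n) 0]) _,
      PySem.Dict.keys_foldl_modify_key rng (fun i => PySem.List.pyGetD p1 i 0) []
      (fun _ i s => PySem.Set.update s
        [PySem.List.pyGetD p1 (i - 1) 0, PySem.List.pyGetD p1 (PySem.Int.mod (i + 1) n) 0]) _,
      pvInit_keys rng nod PySem.Set.empty,
      pvUpdate_eq_self_of_mem _ _ hsub1, pvUpdate_eq_self_of_mem _ _ hsub2]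
  -- … so A's items are, key by key, the deduplicated gathered neighbor stream
  have hA : (List.foldl
      (fun d i => d.modify (PySem.List.pyGetD p2 i 0) [] fun s =>
        s.update [PySem.List.pyGetD p2 (i - 1) 0, PySem.List.pyGetD p2 (PySem.Int.mod (i + 1) n) 0])
      (List.foldl
        (fun d i => d.modify (PySem.List.pyGetD p1 i 0) [] fun s =>
          s.update [PySem.List.pyGetD p1 (i - 1) 0, PySem.List.pyGetD p1 (PySem.Int.mod (i + 1) n) 0])
        (rng.foldl (fun d key => d.insert key PySem.Set.empty) (PySem.Dict.empty : PySem.Dict Int (PySem.Set Int))) rng) rng).items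
      = rng.map (fun k => (k, PySem.Set.ofList (
          (rng.flatMap (fun i => if PySem.List.pyGetD p1 i 0 == k then
            [PySem.List.pyGetD p1 (i - 1) 0, PySem.List.pyGetD p1 (PySem.Int.mod (i + 1) n) 0]
            else [])) ++
          (rng.flatMap (fun i => if PySem.List.pyGetD p2 i 0 == k then
            [PySem.List.pyGetD p2 (i - 1) 0, PySem.List.pyGetD p2 (PySem.Int.mod (i + 1) n) 0]
            else []))))) := by
    rw [PySem.Dict.items_eq_map_keys _ (by rw [hkeysA]; exact nod) [], hkeysA]
    apply List.map_congr_left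
    intro k hk
    rw [pvGetD_foldl_modify (fun i => PySem.List.pyGetD p2 i 0)
        (fun i => PySem.List.pyGetD p2 (i - 1) 0)
        (fun i => PySem.List.pyGetD p2 (PySem.Int.mod (i + 1) n) 0) rng _ k,
      pvGetD_foldl_modify (fun i => PySem.List.pyGetD p1 i 0)
        (fun i => PySem.List.pyGetD p1 (i - 1) 0)
        (fun i => PySem.List.pyGetD p1 (PySem.Int.mod (i + 1) n) 0) rng _ k,
      pvInit_getD rng nod PySem.Set.empty k hk [], PySem.Set.update_empty,
      ← PySem.Set.ofList_append]
  -- B's position index: keys stay rng …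
  have hkeysB : (List.foldl
      (fun d i => d.modify (PySem.List.pyGetD p2 i 0) [] fun l => l ++ [(p2, i)])
      (List.foldl
        (fun d i => d.modify (PySem.List.pyGetD p1 i 0) [] fun l => l ++ [(p1, i)])
        (rng.foldl (fun d key => d.insert key []) (PySem.Dict.empty : PySem.Dict Int (List (List Int × Int)))) rng) rng).keys
      = rng := by
    rw [PySem.Dict.keys_foldl_modify_key rng (fun i => PySem.List.pyGetD p2 i 0) []
      (fun _ i l => l ++ [(p2, i)]) _,
      PySem.Dict.keys_foldl_modify_key rng (fun i => PySem.List.pyGetD p1 i 0) []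
      (fun _ i l => l ++ [(p1, i)]) _,
      pvInit_keys rng nod ([] : List (List Int × Int)),
      pvUpdate_eq_self_of_mem _ _ hsub1, pvUpdate_eq_self_of_mem _ _ hsub2]
  -- … so B's items are, key by key, the occurrence lists of both parents
  have hB : (List.foldl
      (fun d i => d.modify (PySem.List.pyGetD p2 i 0) [] fun l => l ++ [(p2, i)])
      (List.foldl
        (fun d i => d.modify (PySem.List.pyGetD p1 i 0) [] fun l => l ++ [(p1, i)])
        (rng.foldl (fun d key => d.insert key []) (PySem.Dict.empty : PySem.Dict Int (List (List Int × Int)))) rng) rng).items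
      = rng.map (fun k => (k,
          (rng.flatMap (fun i => if PySem.List.pyGetD p1 i 0 == k then [(p1, i)] else [])) ++
          (rng.flatMap (fun i => if PySem.List.pyGetD p2 i 0 == k then [(p2, i)] else [])))) := by
    rw [PySem.Dict.items_eq_map_keys _ (by rw [hkeysB]; exact nod) [], hkeysB]
    apply List.map_congr_left
    intro k hk
    rw [pvGetD_foldl_modify_append (fun i => PySem.List.pyGetD p2 i 0) (fun i => (p2, i)) rng _ k,
      pvGetD_foldl_modify_append (fun i => PySem.List.pyGetD p1 i 0) (fun i => (p1, i)) rng _ k,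
      pvInit_getD rng nod ([] : List (List Int × Int)) k hk [], List.nil_append]
  rw [hA, hB, List.map_map]
  apply List.map_congr_left
  intro k _
  simp only [Function.comp_apply, List.flatMap_append,
    pvFlatMap_if (fun i => PySem.List.pyGetD p1 i 0 == k) (fun i => (p1, i))
      (fun pi => [PySem.List.pyGetD pi.1 (pi.2 - 1) 0,
                  PySem.List.pyGetD pi.1 (PySem.Int.mod (pi.2 + 1) n) 0]) rng,
    pvFlatMap_if (fun i => PySem.List.pyGetD p2 i 0 == k) (fun i => (p2, i))
      (fun pi => [PySem.List.pyGetD pi.1 (pi.2 - 1) 0,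
                  PySem.List.pyGetD pi.1 (PySem.Int.mod (pi.2 + 1) n) 0]) rng]

-- ===== VERDICT (by name: the statement is the Claim_ definition above) =====
theorem create_neighbor_list_spec : Claim_equal_create_neighbor_list := by
  intro p1 p2 _ hpre
  exact pvMain p1 p2 hpre.1 hpre.2.1 hpre.2.2
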